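-- pv_equiv track=rewrite | github.com/tmaskzz81/arithmaticORG | main.py | get_signed_value
-- ===== SOURCE A (Python) =====
-- def get_signed_value(biNumber):
--     result = 0
--     temp = int(biNumber)
--
--     for i in range(len(str(biNumber)) - 1):
--         result = result + ((temp % 10) * (2 ** i))
--         temp = temp // 10
--
--     sign = temp
--     if sign == 1:
--         result = -1 * result
--
--     return str(result)
-- ===== SOURCE B (Python) =====
-- def get_signed_value(biNumber):
--     s = str(biNumber)
--     sign = int(s[0])
--     result = 0
--     for ch in s[1:]:
--         result = result * 2 + int(ch)
--     if sign == 1: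
--         result = -result
--     return str(result)
-- ===== Notes on version B (the rewrite author's own statement) =====
-- stated objective: idiomatic
-- what changed: B reads the decimal string directly: sign = first character, magnitude by left-to-right Horner evaluation (result = result*2 + digit) over the remaining characters, replacing A's arithmetic digit-stripping (temp % 10, temp //= 10) with per-position 2**i powers.
-- outside the precondition, e.g. on get_signed_value(-101): A returns '59', B raises ValueError
import Mathlib
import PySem

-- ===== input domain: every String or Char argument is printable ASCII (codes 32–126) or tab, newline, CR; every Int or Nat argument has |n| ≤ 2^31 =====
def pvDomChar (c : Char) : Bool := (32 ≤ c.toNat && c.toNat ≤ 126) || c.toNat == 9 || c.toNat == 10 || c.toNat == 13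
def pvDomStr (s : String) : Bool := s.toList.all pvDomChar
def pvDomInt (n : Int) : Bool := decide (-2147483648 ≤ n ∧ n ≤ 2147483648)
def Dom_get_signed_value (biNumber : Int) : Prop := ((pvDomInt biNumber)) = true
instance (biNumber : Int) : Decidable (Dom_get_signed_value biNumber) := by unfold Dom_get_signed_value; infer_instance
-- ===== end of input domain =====

-- B reads the decimal string itself: sign = first character, magnitude by left-to-right
-- Horner evaluation over the remaining characters, instead of A's temp%10 // 2**i digit-stripping.

-- ===== PORT A =====
-- 2 ** i is ported as 2 ^ i.toNat: i ranges over range(len-1), so 0 ≤ i always (exact).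
def get_signed_value (biNumber : Int) : String :=
  let temp := biNumber  -- temp = int(biNumber): biNumber is already an int
  let st := (PySem.List.pyRange 0 (PySem.Str.len (PySem.Int.toStr biNumber) - 1) 1).foldl
      (fun (st : Int × Int) i =>
        (st.1 + PySem.Int.mod st.2 10 * 2 ^ i.toNat, PySem.Int.floordiv st.2 10))
      (0, temp)
  let sign := st.2
  let result := if sign = 1 then -1 * st.1 else st.1
  PySem.Int.toStr result

-- ===== PORT B =====
-- s = str(biNumber) is never empty, so s[0] is in range; int(s[0]) / int(ch) raise (PySem: none)
-- only when a character is not a digit, i.e. only for biNumber < 0 (the '-' sign), which Pre_ excludes;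
-- the .getD 0 default is never the value on any admitted input.  s[1:] on a list is List.drop 1 (exact).
def get_signed_value_alt (biNumber : Int) : String :=
  let s := (PySem.Int.toStr biNumber).toList
  let sign := (PySem.Int.ofChars? [PySem.List.pyGetD s 0 ' ']).getD 0
  let result := (s.drop 1).foldl (fun r c => r * 2 + (PySem.Int.ofChars? [c]).getD 0) 0
  let result := if sign = 1 then -result else result
  PySem.Int.toStr result

-- ===== PRECONDITION & SPEC =====
-- Pre_ excludes negative biNumber: there B's int(s[0]) raises ValueError on the '-' character,
-- while A returns a value obtained by floor-dividing the negative number.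
def Pre_get_signed_value (biNumber : Int) : Prop := 0 ≤ biNumber
instance (biNumber : Int) : Decidable (Pre_get_signed_value biNumber) := by
  unfold Pre_get_signed_value; infer_instance
def pvWitness_get_signed_value : Int := (1011)

def Spec_get_signed_value (biNumber : Int) (out : String) : Prop := out = get_signed_value_alt biNumber
instance (biNumber : Int) (out : String) : Decidable (Spec_get_signed_value biNumber out) := by unfold Spec_get_signed_value; infer_instance

-- ===== CLAIM (what is proved, stated in full; the proofs are below) =====
def Claim_equal_get_signed_value : Prop := ∀ (biNumber : Int), Dom_get_signed_value biNumber → Pre_get_signed_value biNumber → Spec_get_signed_value biNumber (get_signed_value biNumber)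

-- ===== LEMMAS AND PROOFS =====

-- the common value both loops compute: Σ_{i<k} (i-th decimal digit of t from the right) · 2^i
def pvSumA (t k : Nat) : Nat := (Finset.range k).sum (fun i => t / 10 ^ i % 10 * 2 ^ i)

lemma pvSumA_succ (t k : Nat) :
    pvSumA t (k + 1) = pvSumA t k + t / 10 ^ k % 10 * 2 ^ k := by
  simp [pvSumA, Finset.sum_range_succ]

-- A's loop: k iterations starting from (0, t) accumulate pvSumA t k and strip k digits
lemma foldA (t : Nat) : ∀ k : Nat,
    (List.map (fun j : Nat => (j : Int)) (List.range k)).foldl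
      (fun (st : Int × Int) i =>
        (st.1 + PySem.Int.mod st.2 10 * 2 ^ i.toNat, PySem.Int.floordiv st.2 10))
      ((0 : Int), (t : Int))
    = (((pvSumA t k : Nat) : Int), ((t / 10 ^ k : Nat) : Int)) := by
  intro k
  induction k with
  | zero => simp [pvSumA]
  | succ k ih =>
    rw [List.range_succ, List.map_append, List.foldl_append, ih]
    simp only [List.map_cons, List.map_nil, List.foldl_cons, List.foldl_nil, Prod.mk.injEq]
    constructor
    · have h1 : PySem.Int.mod ((t / 10 ^ k : Nat) : Int) 10 = ((t / 10 ^ k % 10 : Nat) : Int) := by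
        exact_mod_cast PySem.Int.mod_natCast (t / 10 ^ k) 10
      rw [h1, pvSumA_succ]
      push_cast
      simp
    · have h2 : PySem.Int.floordiv ((t / 10 ^ k : Nat) : Int) 10 = ((t / 10 ^ k / 10 : Nat) : Int) := by
        exact_mod_cast PySem.Int.floordiv_natCast (t / 10 ^ k) 10
      rw [h2, Nat.div_div_eq_div_mul, ← pow_succ]

-- int(c) for a single digit character
lemma cv (d : Nat) (h : d < 10) :
    (PySem.Int.ofChars? [Nat.digitChar d]).getD 0 = (d : Int) := by
  interval_cases d <;> rfl

-- B's Horner fold with accumulator r versus accumulator 0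
lemma foldB_shift (l : List Char) (r : Int) :
    l.foldl (fun r c => r * 2 + (PySem.Int.ofChars? [c]).getD 0) r
      = r * 2 ^ l.length + l.foldl (fun r c => r * 2 + (PySem.Int.ofChars? [c]).getD 0) 0 := by
  induction l generalizing r with
  | nil => simp
  | cons c t ih =>
    simp only [List.foldl_cons, List.length_cons]
    rw [ih (r * 2 + (PySem.Int.ofChars? [c]).getD 0), ih ((0 : Int) * 2 + (PySem.Int.ofChars? [c]).getD 0)]
    ring

-- B's Horner fold over the full digit string computes pvSumA over all digits
lemma foldB_toDigits (m : Nat) :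
    (Nat.toDigits 10 m).foldl (fun r c => r * 2 + (PySem.Int.ofChars? [c]).getD 0) 0
      = ((pvSumA m (Nat.toDigits 10 m).length : Nat) : Int) := by
  induction m using Nat.strong_induction_on with
  | _ m ih =>
    rcases lt_or_ge m 10 with h | h
    · rw [Nat.toDigits_of_lt_base h]
      simp only [List.foldl_cons, List.foldl_nil, List.length_cons, List.length_nil]
      rw [cv m h]
      simp [pvSumA, Nat.mod_eq_of_lt h]
    · rw [Nat.toDigits_of_base_le (by norm_num) h, List.foldl_append]
      simp only [List.foldl_cons, List.foldl_nil, List.length_append, List.length_cons,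
        List.length_nil]
      rw [ih (m / 10) (Nat.div_lt_self (by omega) (by norm_num)),
        cv (m % 10) (Nat.mod_lt _ (by norm_num))]
      have key : pvSumA m ((Nat.toDigits 10 (m / 10)).length + 1)
          = 2 * pvSumA (m / 10) (Nat.toDigits 10 (m / 10)).length + m % 10 := by
        set k := (Nat.toDigits 10 (m / 10)).length
        have hterm : ∀ i, m / 10 ^ (i + 1) % 10 * 2 ^ (i + 1)
            = 2 * (m / 10 / 10 ^ i % 10 * 2 ^ i) := by
          intro i
          rw [Nat.div_div_eq_div_mul, ← pow_succ']
          ring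
        simp only [pvSumA, Finset.sum_range_succ', hterm, ← Finset.mul_sum]
        simp
      push_cast [key]
      ring

-- leading character of the digit string is the leading decimal digit
lemma lead (m : Nat) :
    (Nat.toDigits 10 m).headD ' '
      = Nat.digitChar (m / 10 ^ ((Nat.toDigits 10 m).length - 1)) := by
  induction m using Nat.strong_induction_on with
  | _ m ih =>
    rcases lt_or_ge m 10 with hm | hm
    · simp [Nat.toDigits_of_lt_base hm]
    · have hrec := Nat.toDigits_of_base_le (b := 10) (n := m) (by norm_num) hm
      have hpos : 0 < (Nat.toDigits 10 (m / 10)).length := Nat.length_toDigits_pos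
      obtain ⟨b, u, he⟩ : ∃ b u, Nat.toDigits 10 (m / 10) = b :: u :=
        List.exists_cons_of_ne_nil (List.ne_nil_of_length_pos hpos)
      have hih := ih (m / 10) (Nat.div_lt_self (by omega) (by norm_num))
      rw [he] at hih
      simp only [List.headD_cons, List.length_cons, Nat.add_sub_cancel] at hih
      rw [hrec, he]
      simp only [List.cons_append, List.headD_cons, List.length_append, List.length_cons,
        List.length_nil, Nat.add_sub_cancel]
      rw [hih]
      congr 1
      rw [Nat.div_div_eq_div_mul, ← pow_succ']

-- upper bound: the number is below 10^(number of digits)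
lemma lt_pow_len (m : Nat) : m < 10 ^ (Nat.toDigits 10 m).length :=
  (Nat.length_toDigits_le_iff (by norm_num) Nat.length_toDigits_pos).mp le_rfl

-- ===== VERDICT (by name: the statement is the Claim_ definition above) =====
theorem get_signed_value_spec : Claim_equal_get_signed_value := by
  intro n _ hpre
  unfold Spec_get_signed_value
  obtain ⟨m, rfl⟩ : ∃ m : Nat, n = (m : Int) := ⟨n.toNat, (Int.toNat_of_nonneg hpre).symm⟩
  obtain ⟨a, t, hcons⟩ : ∃ a t, Nat.toDigits 10 m = a :: t :=
    List.exists_cons_of_ne_nil (List.ne_nil_of_length_pos Nat.length_toDigits_pos)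
  have hchars : (PySem.Int.toStr (m : Int)).toList = a :: t := by
    rw [PySem.Int.toList_toStr]
    simp [PySem.Int.toChars, Int.not_lt.mpr (Int.natCast_nonneg m), hcons]
  have hsignlt : m / 10 ^ t.length < 10 := by
    have hub : m < 10 ^ (t.length + 1) := by
      have h1 := lt_pow_len m
      rw [hcons] at h1
      simpa using h1
    apply Nat.div_lt_of_lt_mul
    rw [← pow_succ]
    exact hub
  have ha : a = Nat.digitChar (m / 10 ^ t.length) := by
    have h := lead m
    rw [hcons] at h
    simpa using h
  have hlen : PySem.Str.len (PySem.Int.toStr (m : Int)) - 1 = ((t.length : Nat) : Int) := by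
    rw [PySem.Str.len_eq, hchars]
    simp
  have hget : PySem.List.pyGetD (a :: t) 0 ' ' = a := by
    rw [PySem.List.pyGetD_of_nonneg _ _ (by norm_num)]
    rfl
  have hsv : (PySem.Int.ofChars? [PySem.List.pyGetD (a :: t) 0 ' ']).getD 0
      = ((m / 10 ^ t.length : Nat) : Int) := by
    rw [hget, ha]
    exact cv _ hsignlt
  have htail : t.foldl (fun r c => r * 2 + (PySem.Int.ofChars? [c]).getD 0) 0
      = ((pvSumA m t.length : Nat) : Int) := by
    have hfull := foldB_toDigits m
    rw [hcons] at hfull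
    simp only [List.foldl_cons, List.length_cons] at hfull
    rw [zero_mul, zero_add, ha, cv _ hsignlt, foldB_shift] at hfull
    rw [pvSumA_succ, Nat.mod_eq_of_lt hsignlt] at hfull
    push_cast at hfull ⊢
    linarith
  simp only [get_signed_value, get_signed_value_alt, hlen, PySem.List.pyRange_zero_natCast,
    foldA, hchars, hsv, List.drop_one, List.tail_cons, htail, neg_one_mul]
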